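-- pv_equiv track=rewrite | github.com/wrochira/iris-validation | iris_tools/rotamer_generate_library.py | int_compress
-- ===== SOURCE A (Python) =====
-- def int_compress(xs, n, l):
--     ys = [ ]
--     xis = [ ]
--     ps = [ 2**(l*(n-i-1)) for i in range(n) ]
--     if len(xs)%n > 0:
--         xs = xs + [ 0 ] * (n-len(xs)%n)
--     for x in xs:
--         xis.append(x)
--         if len(xis) == n:
--             y = 0
--             for i, xi in enumerate(xis):
--                 y += xi * ps[i]
--             ys.append(y)
--             xis = [ ]
--     return ys
-- ===== SOURCE B (Python) =====
-- def _pack(chunk, l):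
--     y = chunk[0]
--     for xi in chunk[1:]:
--         y = y * 2 ** l + xi
--     return y
--
--
-- def int_compress(xs, n, l):
--     if len(xs) % n > 0:
--         xs = xs + [0] * (n - len(xs) % n)
--     return [_pack(xs[i:i + n], l) for i in range(0, len(xs), n)]
-- ===== Notes on version B (the rewrite author's own statement) =====
-- stated objective: simpler
-- what changed: Replaces A's precomputed power table, rolling accumulator list and index-weighted enumerate-sum with a list comprehension over chunk start indices that packs each slice by Horner's shift-accumulate recurrence.
-- outside the precondition, e.g. on int_compress([1, 2], 2, -1): A returns [2.5], B returns [2.5]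
import Mathlib
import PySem

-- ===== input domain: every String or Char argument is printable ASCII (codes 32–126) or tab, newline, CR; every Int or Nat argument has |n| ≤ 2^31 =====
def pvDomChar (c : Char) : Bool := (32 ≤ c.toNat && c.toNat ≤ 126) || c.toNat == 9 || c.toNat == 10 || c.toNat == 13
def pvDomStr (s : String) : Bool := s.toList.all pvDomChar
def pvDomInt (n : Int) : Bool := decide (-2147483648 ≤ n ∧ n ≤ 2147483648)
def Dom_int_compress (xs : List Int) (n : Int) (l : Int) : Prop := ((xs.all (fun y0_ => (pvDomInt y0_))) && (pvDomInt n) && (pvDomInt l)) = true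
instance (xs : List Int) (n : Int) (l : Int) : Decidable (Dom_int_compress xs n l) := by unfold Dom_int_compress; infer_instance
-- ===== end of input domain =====

-- B replaces A's precomputed power table + index-weighted enumerate-sum by per-chunk Horner
-- shift-accumulate over slices (objective: simpler). Ports are exact on Pre_ (integer results only).

-- ===== PORT A =====
-- inner loop 'y = 0; for i, xi in enumerate(xis): y += xi * ps[i]'
def icPack (ps : List Int) (xis : List Int) : Int :=
  (PySem.List.enumerate xis).foldl (fun y p => y + p.2 * PySem.List.pyGetD ps p.1 0) 0

-- body of 'for x in xs' acting on the state (ys, xis)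
def icStep (n : Int) (ps : List Int) (st : List Int × List Int) (x : Int) : List Int × List Int :=
  let xis := st.2 ++ [x]
  if (xis.length : Int) = n then (st.1 ++ [icPack ps xis], []) else (st.1, xis)

def int_compress (xs : List Int) (n : Int) (l : Int) : List Int :=
  -- 2**(l*(n-i-1)) ported via .toNat: exact whenever the table entry is used under Pre_ (exponent ≥ 0 there)
  let ps : List Int := (PySem.List.pyRange 0 n 1).map (fun i => 2 ^ ((l * (n - i - 1)).toNat))
  let xs' : List Int :=
    if PySem.Int.mod (xs.length : Int) n > 0
    then xs ++ List.replicate (n - PySem.Int.mod (xs.length : Int) n).toNat 0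
    else xs
  (xs'.foldl (icStep n ps) ([], [])).1

-- ===== PORT B =====
-- Source B's _pack: chunk[0] / chunk[1:] ported as headI / tail (chunk is nonempty whenever called under Pre_)
def icHorner (l : Int) (chunk : List Int) : Int :=
  chunk.tail.foldl (fun y xi => y * 2 ^ l.toNat + xi) chunk.headI

def int_compress_alt (xs : List Int) (n : Int) (l : Int) : List Int :=
  let xs' : List Int :=
    if PySem.Int.mod (xs.length : Int) n > 0
    then xs ++ List.replicate (n - PySem.Int.mod (xs.length : Int) n).toNat 0
    else xs
  (PySem.List.pyRange 0 (xs'.length : Int) n).foldl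
    (fun ys i => ys ++ [icHorner l (PySem.List.slice xs' (some i) (some (i + n)))]) []

-- ===== PRECONDITION & SPEC =====
-- Pre_ excludes n = 0, where both programs raise ZeroDivisionError, and the inputs with
-- n ≥ 2, l < 0 and xs nonempty, where 2**(negative) makes A's result a list of floats,
-- not a value of the declared list-of-int type.
def Pre_int_compress (xs : List Int) (n : Int) (l : Int) : Prop :=
  n ≠ 0 ∧ (0 ≤ l ∨ n = 1 ∨ n < 0 ∨ xs = [])
instance (xs : List Int) (n : Int) (l : Int) : Decidable (Pre_int_compress xs n l) := by
  unfold Pre_int_compress; infer_instance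

def pvWitness_int_compress : List Int × Int × Int := ([1, 2, 3], 2, 4)

def Spec_int_compress (xs : List Int) (n : Int) (l : Int) (out : List Int) : Prop := out = int_compress_alt xs n l
instance (xs : List Int) (n : Int) (l : Int) (out : List Int) : Decidable (Spec_int_compress xs n l out) := by
  unfold Spec_int_compress; infer_instance

-- ===== CLAIM (what is proved, stated in full; the proofs are below) =====
def Claim_equal_int_compress : Prop := ∀ (xs : List Int) (n : Int) (l : Int), Dom_int_compress xs n l → Pre_int_compress xs n l → Spec_int_compress xs n l (int_compress xs n l)

-- ===== LEMMAS AND PROOFS =====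

-- with a negative n the '== n' test of A's loop never fires
lemma foldA_neg {n : Int} (hn : n < 0) {ps : List Int} :
    ∀ (xs acc ys : List Int), xs.foldl (icStep n ps) (ys, acc) = (ys, acc ++ xs) := by
  intro xs
  induction xs with
  | nil => intro acc ys; simp
  | cons x t ih =>
    intro acc ys
    have hne : (((acc ++ [x]).length : Int)) ≠ n := by
      have : (0:Int) ≤ ((acc ++ [x]).length : Int) := by positivity
      omega
    simp only [List.foldl_cons, icStep, if_neg hne, ih]
    simp

-- one full chunk of A's loop: the accumulator fills up to n and flushes
lemma foldA_inner {n : Int} (hn : 0 < n) {ps : List Int} :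
    ∀ (c acc ys : List Int), acc.length + c.length = n.toNat → c ≠ [] →
      c.foldl (icStep n ps) (ys, acc) = (ys ++ [icPack ps (acc ++ c)], []) := by
  intro c
  induction c with
  | nil => intro _ _ _ h; exact absurd rfl h
  | cons x t ih =>
    intro acc ys hlen _
    by_cases ht : t = []
    · subst ht
      have heq : (((acc ++ [x]).length : Int)) = n := by
        simp only [List.length_append, List.length_cons, List.length_nil] at hlen ⊢
        omega
      simp only [List.foldl_cons, icStep, if_pos heq, List.foldl_nil]
    · have hne : (((acc ++ [x]).length : Int)) ≠ n := by
        have : 0 < t.length := List.length_pos_iff.mpr ht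
        simp at hlen ⊢; omega
      simp only [List.foldl_cons, icStep, if_neg hne]
      have := ih (acc ++ [x]) ys (by simp at hlen ⊢; omega) ht
      simpa [List.append_assoc] using this

-- A's whole loop over a list of q full chunks
lemma foldA_chunks {n : Int} (hn : 0 < n) {ps : List Int} :
    ∀ (q : Nat) (xs ys : List Int), xs.length = q * n.toNat →
      xs.foldl (icStep n ps) (ys, []) =
        (ys ++ (List.range q).map (fun j => icPack ps ((xs.drop (j * n.toNat)).take n.toNat)), []) := by
  intro q
  induction q with
  | zero =>
    intro xs ys h
    have : xs = [] := List.eq_nil_of_length_eq_zero (by simpa using h)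
    subst this; simp
  | succ q ih =>
    intro xs ys h
    have hK : 0 < n.toNat := by omega
    have hKle : n.toNat ≤ xs.length := by
      rw [h]; nlinarith
    have hsplit := List.take_append_drop n.toNat xs
    have htl : (xs.take n.toNat).length = n.toNat := by
      simp [Nat.min_eq_left hKle]
    have hne : xs.take n.toNat ≠ [] := by
      intro hnil; rw [hnil] at htl; simp at htl; omega
    conv_lhs => rw [← hsplit]
    rw [List.foldl_append]
    rw [foldA_inner hn (xs.take n.toNat) [] ys (by simpa using htl) hne]
    rw [ih (xs.drop n.toNat) _ (by simp [h]; ring_nf; omega)]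
    simp only [List.nil_append, List.range_succ_eq_map, List.map_cons, List.map_map,
      Prod.mk.injEq]
    refine ⟨?_, trivial⟩
    rw [List.append_assoc]
    congr 1
    rw [List.singleton_append]
    congr 1
    · simp
    · apply List.map_congr_left
      intro j _
      simp only [Function.comp_apply]
      rw [List.drop_drop]
      congr 2
      rw [Nat.succ_mul, Nat.add_comm]

-- Horner's accumulation as a big-endian weighted sum
lemma horner_sum (m : Int) :
    ∀ (t : List Int) (a : Int),
      t.foldl (fun y x => y * m + x) a =
        ((List.range (t.length + 1)).map (fun k => (a :: t).getD k 0 * m ^ (t.length - k))).sum := by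
  intro t
  induction t with
  | nil => intro a; simp
  | cons x t' ih =>
    intro a
    rw [List.foldl_cons, ih (a * m + x)]
    simp only [List.length_cons, List.range_succ_eq_map, List.map_cons, List.map_map,
      List.sum_cons, Function.comp_def, List.getD_cons_succ, List.getD_cons_zero,
      Nat.succ_sub_succ, Nat.succ_eq_add_one, Nat.sub_zero]
    rw [pow_succ]
    ring

-- the exponent in A's power table, under Pre_, is the Horner exponent
lemma exponent_eq {n l : Int} (hn : 0 < n) (hl : 0 ≤ l ∨ n = 1) {k : Nat} (hk : k < n.toNat) :
    (l * (n - (k : Int) - 1)).toNat = l.toNat * (n.toNat - 1 - k) := by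
  rcases hl with hl | hl
  · have h1 : n - (k : Int) - 1 = ((n.toNat - 1 - k : Nat) : Int) := by
      omega
    rw [h1, show l = ((l.toNat : Int)) from (Int.toNat_of_nonneg hl).symm]
    rw [← Int.natCast_mul, Int.toNat_natCast, Int.toNat_natCast]
  · subst hl
    have : k = 0 := by omega
    subst this; simp

-- per chunk: A's table-weighted sum equals B's Horner value
lemma pack_eq_horner {n l : Int} (hn : 0 < n) (hl : 0 ≤ l ∨ n = 1)
    (c : List Int) (hc : c.length = n.toNat) :
    icPack ((PySem.List.pyRange 0 n 1).map (fun i => 2 ^ ((l * (n - i - 1)).toNat))) c =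
      icHorner l c := by
  obtain ⟨a, t, rfl⟩ : ∃ a t, c = a :: t := by
    cases c with
    | nil => exfalso; simp at hc; omega
    | cons a t => exact ⟨a, t, rfl⟩
  unfold icPack icHorner
  rw [PySem.List.enumerate_eq_map_pyRange (a :: t) 0, List.foldl_map, PySem.List.foldl_add]
  simp only [PySem.List.len_eq, PySem.List.pyRange_one, List.map_map, zero_add]
  rw [horner_sum]
  simp only [List.tail_cons, List.headI_cons, Int.sub_zero, Int.toNat_natCast,
    Function.comp_def, List.length_cons]
  congr 1
  apply List.map_congr_left
  intro k hk
  rw [List.mem_range] at hk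
  have hc' : t.length + 1 = n.toNat := by simpa using hc
  have hkn : k < n.toNat := by omega
  rw [PySem.List.pyGetD_natCast, PySem.List.pyGetD_natCast,
    PySem.List.getD_map_range _ _ _ _ hkn]
  rw [exponent_eq hn hl hkn, pow_mul]
  congr 2
  omega

-- B's loop, rewritten as a map over the chunk indices
lemma foldB_chunks {n : Int} (hn : 0 < n) (l : Int) (q : Nat) (L : List Int)
    (hlen : L.length = q * n.toNat) :
    (PySem.List.pyRange 0 (L.length : Int) n).foldl
        (fun ys i => ys ++ [icHorner l (PySem.List.slice L (some i) (some (i + n)))]) [] =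
      (List.range q).map (fun j => icHorner l ((L.drop (j * n.toNat)).take n.toNat)) := by
  have hK : 0 < n.toNat := by omega
  have hn' : n = ((n.toNat : Int)) := (Int.toNat_of_nonneg hn.le).symm
  rw [hlen]
  rcases Nat.eq_zero_or_pos q with hq | hq
  · subst hq
    rw [show ((0 * n.toNat : Nat) : Int) = 0 by simp]
    rw [PySem.List.pyRange_of_pos 0 0 hn]
    rw [if_neg (lt_irrefl 0), List.range_zero, List.map_nil, List.foldl_nil, List.map_nil]
  · rw [PySem.List.pyRange_of_pos 0 _ hn]
    have hpos : (0:Int) < ((q * n.toNat : Nat) : Int) := by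
      have : 0 < q * n.toNat := Nat.mul_pos hq hK
      exact_mod_cast this
    rw [if_pos hpos]
    have hcount : ((((q * n.toNat : Nat) : Int) - 0 + n - 1) / n).toNat = q := by
      have h1 : (((q * n.toNat : Nat) : Int) - 0 + n - 1) = (n - 1) + ((q : Int)) * n := by
        push_cast [Int.toNat_of_nonneg hn.le]; ring
      rw [h1, Int.add_mul_ediv_right _ _ hn.ne',
        Int.ediv_eq_zero_of_lt (by omega) (by omega)]
      omega
    rw [hcount, List.foldl_map, PySem.List.foldl_append_singleton_eq_map, List.nil_append]
    apply List.map_congr_left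
    intro k hk
    congr 1
    have h1 : ((0:Int) + n * ((k:Nat):Int)) = (((n.toNat * k : Nat)) : Int) := by
      push_cast [Int.toNat_of_nonneg hn.le]; ring
    rw [h1]
    have h2 : ((((n.toNat * k : Nat)) : Int) + n) = ((((n.toNat * k : Nat)) : Int) + ((n.toNat : Nat) : Int)) := by
      rw [Int.toNat_of_nonneg hn.le]
    rw [h2, PySem.List.slice_natCast_add, Nat.mul_comm]

-- length of a full chunk
lemma chunk_len {K q j : Nat} (_hK : 0 < K) (hj : j < q) (L : List Int)
    (hq : L.length = q * K) : ((L.drop (j * K)).take K).length = K := by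
  have h3 : j * K + K ≤ q * K := by
    calc j * K + K = (j + 1) * K := by ring
    _ ≤ q * K := Nat.mul_le_mul_right K (Nat.succ_le_of_lt hj)
  have h4 : K ≤ L.length - j * K := Nat.le_sub_of_add_le (by rw [hq, Nat.add_comm]; exact h3)
  simp only [List.length_take, List.length_drop]
  exact Nat.min_eq_left h4

theorem int_compress_spec : Claim_equal_int_compress := by
  intro xs n l _ hpre
  obtain ⟨hn0, hcase⟩ := hpre
  unfold Spec_int_compress
  simp only [int_compress, int_compress_alt]
  by_cases hneg : n < 0
  · have hmod := (PySem.Int.mod_neg_bounds (xs.length : Int) hneg).2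
    rw [if_neg (by omega)]
    rw [foldA_neg hneg xs [] []]
    have hr : PySem.List.pyRange 0 (xs.length : Int) n = [] := by
      have h1 : ¬ ((xs.length : Int) < 0) := by omega
      simp [PySem.List.pyRange, hn0, not_lt_of_gt hneg, h1]
    rw [hr]
    rfl
  · have hn : 0 < n := by omega
    set M := PySem.Int.mod (xs.length : Int) n with hM
    have hMe : M = (xs.length : Int) % n := PySem.Int.mod_eq_emod_of_pos hn
    set L := (if M > 0 then xs ++ List.replicate (n - M).toNat 0 else xs) with hL
    have hdvd : n ∣ ((L.length : Int)) := by
      by_cases hpad : M > 0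
      · have hMlt : M < n := by
          rw [hMe]; exact Int.emod_lt_of_pos _ hn
        have hlen : ((L.length : Int)) = (xs.length : Int) + (n - M) := by
          rw [hL, if_pos hpad]
          simp [Int.toNat_of_nonneg (by omega : (0:Int) ≤ n - M)]
        have hdm := Int.mul_ediv_add_emod (xs.length : Int) n
        refine ⟨(xs.length : Int) / n + 1, ?_⟩
        rw [hlen, mul_add, mul_one, hMe]
        linarith [hdm]
      · have hM0 : M = 0 := by
          have : 0 ≤ M := by rw [hMe]; exact Int.emod_nonneg _ hn.ne'
          omega
        rw [hL, if_neg hpad]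
        rw [hMe] at hM0
        exact Int.dvd_of_emod_eq_zero hM0
    obtain ⟨q, hq⟩ : ∃ q, L.length = q * n.toNat := by
      obtain ⟨c, hc⟩ := hdvd
      have hc0 : 0 ≤ c := by nlinarith [Int.natCast_nonneg L.length]
      refine ⟨c.toNat, ?_⟩
      have : ((L.length : Int)) = ((c.toNat * n.toNat : Nat) : Int) := by
        push_cast [Int.toNat_of_nonneg hn.le, Int.toNat_of_nonneg hc0]
        rw [hc]; ring
      exact_mod_cast this
    rw [foldA_chunks hn q L [] hq, foldB_chunks hn l q L hq]
    simp only [List.nil_append]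
    apply List.map_congr_left
    intro j hj
    rw [List.mem_range] at hj
    have hl' : 0 ≤ l ∨ n = 1 := by
      rcases hcase with h | h | h | h
      · exact Or.inl h
      · exact Or.inr h
      · omega
      · exfalso
        have hM0 : M = 0 := by rw [hMe, h]; simp
        have hLx : L = xs := by rw [hL, hM0]; norm_num
        rw [hLx, h] at hq
        simp only [List.length_nil] at hq
        rcases Nat.mul_eq_zero.mp hq.symm with h0 | h0 <;> omega
    exact pack_eq_horner hn hl' _ (chunk_len (by omega) hj L hq)
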